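-- pv_equiv track=rewrite | github.com/Alxmrphi/TC2See | fmri_processing/scripts/glm_single_3_clip.py | filter_counts
-- ===== SOURCE A (Python) =====
-- def filter_counts(all_names, max_count):
--     counts = {}
--     indices = []
--     for i, name in enumerate(all_names):
--         if name not in counts:
--             counts[name] = 0
--         counts[name] += 1
--         if counts[name] > max_count:
--             continue
--         indices.append(i)
--     return indices
-- ===== SOURCE B (Python) =====
-- def filter_counts(all_names, max_count):
--     # Group-by: map each name to the list of indices where it occurs,
--     # then keep the first max_count indices of each group and sort.
--     groups = {}
--     for i, name in enumerate(all_names):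
--         groups.setdefault(name, []).append(i)
--     k = max(max_count, 0)
--     kept = []
--     for idxs in groups.values():
--         kept.extend(idxs[:k])
--     kept.sort()
--     return kept
-- ===== Notes on version B (the rewrite author's own statement) =====
-- stated objective: alternative
-- what changed: Replaces the single pass with a running per-name counter by a group-by table (name -> list of its occurrence indices), a bounded-prefix take of each group (clamping negative max_count to 0), and a final sort restoring ascending index order.
import Mathlib
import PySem

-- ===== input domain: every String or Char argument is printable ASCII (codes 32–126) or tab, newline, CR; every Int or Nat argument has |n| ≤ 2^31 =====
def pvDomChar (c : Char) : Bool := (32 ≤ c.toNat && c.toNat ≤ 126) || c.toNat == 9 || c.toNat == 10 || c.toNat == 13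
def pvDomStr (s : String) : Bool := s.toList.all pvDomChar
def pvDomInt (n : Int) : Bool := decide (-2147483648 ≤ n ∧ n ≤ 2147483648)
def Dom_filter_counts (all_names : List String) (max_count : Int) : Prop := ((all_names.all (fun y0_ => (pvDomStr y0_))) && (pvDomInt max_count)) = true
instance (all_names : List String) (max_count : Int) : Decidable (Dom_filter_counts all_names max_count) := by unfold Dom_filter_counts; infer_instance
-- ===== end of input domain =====

-- B replaces A's single pass with a running per-name counter by a group-by table of occurrence
-- indices, a bounded prefix of each group, and a final sort (alternative decomposition; not faster).

-- ===== PORT A =====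
def filter_counts (all_names : List String) (max_count : Int) : List Int :=
  ((PySem.List.enumerate all_names 0).foldl
    (fun (st : PySem.Dict String Int × List Int) p =>
      let counts := if (PySem.Dict.get? st.1 p.2).isNone then PySem.Dict.insert st.1 p.2 0 else st.1
      let counts := PySem.Dict.insert counts p.2 (PySem.Dict.getD counts p.2 0 + 1)
      if PySem.Dict.getD counts p.2 0 > max_count then (counts, st.2)
      else (counts, st.2 ++ [p.1]))
    (PySem.Dict.empty, [])).2

-- ===== PORT B =====
def filter_counts_alt (all_names : List String) (max_count : Int) : List Int :=
  let groups : PySem.Dict String (List Int) :=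
    (PySem.List.enumerate all_names 0).foldl
      (fun d p => PySem.Dict.modify d p.2 [] (fun l => l ++ [p.1])) PySem.Dict.empty
  let k : Int := max max_count 0
  let kept : List Int :=
    (PySem.Dict.values groups).foldl
      (fun acc idxs => acc ++ PySem.List.slice idxs none (some k)) []
  PySem.List.sorted kept (fun x => x) false

-- ===== PRECONDITION & SPEC =====
def Spec_filter_counts (all_names : List String) (max_count : Int) (out : List Int) : Prop := out = filter_counts_alt all_names max_count
instance (all_names : List String) (max_count : Int) (out : List Int) : Decidable (Spec_filter_counts all_names max_count out) := by unfold Spec_filter_counts; infer_instance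

-- ===== CLAIM (what is proved, stated in full; the proofs are below) =====
def Claim_equal_filter_counts : Prop := ∀ (all_names : List String) (max_count : Int), Dom_filter_counts all_names max_count → Spec_filter_counts all_names max_count (filter_counts all_names max_count)

-- ===== LEMMAS AND PROOFS =====

-- Reference function: specF mc pre xs = indices (offset by pre.length) of elements x of xs
-- whose occurrence count within (processed prefix ++ [x]) is at most mc.
def specF (mc : Int) : List String → List String → List Int
  | _, [] => []
  | pre, x :: xs =>
    (if ((pre.count x : Int) + 1 ≤ mc) then [(pre.length : Int)] else [])
      ++ specF mc (pre ++ [x]) xs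

lemma loopA_eq (mc : Int) : ∀ (xs pre : List String) (d : PySem.Dict String Int) (acc : List Int),
    (∀ nm, PySem.Dict.getD d nm 0 = (pre.count nm : Int)) →
    ((PySem.List.enumerate xs ((pre.length : Int))).foldl
      (fun (st : PySem.Dict String Int × List Int) p =>
        let counts := if (PySem.Dict.get? st.1 p.2).isNone then PySem.Dict.insert st.1 p.2 0 else st.1
        let counts := PySem.Dict.insert counts p.2 (PySem.Dict.getD counts p.2 0 + 1)
        if PySem.Dict.getD counts p.2 0 > mc then (counts, st.2)
        else (counts, st.2 ++ [p.1]))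
      (d, acc)).2 = acc ++ specF mc pre xs := by
  intro xs
  induction xs with
  | nil => intro pre d acc _; simp [PySem.List.enumerate_nil, specF]
  | cons x xs ih =>
    intro pre d acc hd
    rw [PySem.List.enumerate_cons]
    simp only [List.foldl_cons]
    set counts0 := if (PySem.Dict.get? d x).isNone then PySem.Dict.insert d x 0 else d with hc0
    have hget0 : ∀ nm, PySem.Dict.getD counts0 nm 0 = PySem.Dict.getD d nm 0 := by
      intro nm
      rw [hc0]
      by_cases hnone : (PySem.Dict.get? d x).isNone
      · rw [if_pos hnone]
        by_cases hnm : nm = x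
        · subst hnm
          rw [PySem.Dict.getD_insert_self,
            PySem.Dict.getD_of_get?_eq_none d 0 (Option.isNone_iff_eq_none.mp hnone)]
        · rw [PySem.Dict.getD_insert_of_ne d 0 0 hnm]
      · rw [if_neg hnone]
    set counts1 := PySem.Dict.insert counts0 x (PySem.Dict.getD counts0 x 0 + 1) with hc1
    have hget1 : ∀ nm, PySem.Dict.getD counts1 nm 0 = ((pre ++ [x]).count nm : Int) := by
      intro nm
      rw [hc1]
      by_cases hnm : nm = x
      · subst hnm
        rw [PySem.Dict.getD_insert_self, hget0, hd]
        simp [List.count_append]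
      · rw [PySem.Dict.getD_insert_of_ne counts0 _ 0 hnm, hget0, hd]
        simp [List.count_append, Ne.symm hnm]
    have hx1 : PySem.Dict.getD counts1 x 0 = (pre.count x : Int) + 1 := by
      rw [hget1]; simp [List.count_append]
    have htail : ((pre.length : Int) + 1) = (((pre ++ [x]).length : Nat) : Int) := by simp
    simp only [specF]
    by_cases h : (pre.count x : Int) + 1 ≤ mc
    · rw [if_neg (by rw [hx1]; omega), if_pos h]
      rw [htail, ih (pre ++ [x]) counts1 (acc ++ [(pre.length : Int)]) hget1]
      simp
    · rw [if_pos (by rw [hx1]; omega), if_neg h]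
      rw [htail, ih (pre ++ [x]) counts1 acc hget1]
      simp

-- occurrence-index list of a name
def occ (all : List String) (nm : String) : List Int :=
  ((PySem.List.enumerate all 0).filter (fun p => p.2 == nm)).map (fun p => p.1)

lemma occ_append (all : List String) (x : String) (nm : String) :
    occ (all ++ [x]) nm = occ all nm ++ (if x = nm then [(all.length : Int)] else []) := by
  unfold occ
  rw [PySem.List.enumerate_append]
  simp [PySem.List.enumerate_cons, PySem.List.enumerate_nil, List.filter_append]
  by_cases h : x = nm <;> simp [h]

lemma occ_length (all : List String) (nm : String) : (occ all nm).length = all.count nm := by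
  induction all using List.reverseRecOn with
  | nil => simp [occ, PySem.List.enumerate_nil]
  | append_singleton all x ih =>
    rw [occ_append]
    by_cases h : x = nm <;> simp [h, ih, List.count_append]

lemma cond_iff (mc : Int) (c : Nat) : (c < (max mc 0).toNat) ↔ ((c : Int) + 1 ≤ mc) := by
  rcases le_total mc 0 with h | h
  · rw [max_eq_right h]; omega
  · rw [max_eq_left h]; omega

lemma flatMap_congr_of_not_mem {α β : Type} (g g' : α → List β) (x : α)
    (h : ∀ nm, nm ≠ x → g' nm = g nm) :
    ∀ l : List α, x ∉ l → l.flatMap g' = l.flatMap g := by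
  intro l
  induction l with
  | nil => simp
  | cons a t ih =>
    intro hx
    simp only [List.flatMap_cons]
    rw [h a (by intro he; exact hx (he ▸ List.mem_cons_self)), ih (fun hm => hx (List.mem_cons_of_mem _ hm))]

lemma specF_append (mc : Int) : ∀ (xs pre : List String) (y : String),
    specF mc pre (xs ++ [y]) = specF mc pre xs ++
      (if (((pre ++ xs).count y : Int) + 1 ≤ mc) then [(((pre ++ xs).length : Nat) : Int)] else []) := by
  intro xs
  induction xs with
  | nil => intro pre y; simp [specF]
  | cons x xs ih =>
    intro pre y
    simp only [List.cons_append, specF]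
    rw [ih (pre ++ [x]) y]
    simp [List.append_assoc]

lemma specF_bounds (mc : Int) : ∀ (xs pre : List String),
    (∀ j ∈ specF mc pre xs, ((pre.length : Nat) : Int) ≤ j ∧ j < ((pre.length + xs.length : Nat) : Int)) ∧
      (specF mc pre xs).Pairwise (· < ·) := by
  intro xs
  induction xs with
  | nil => intro pre; simp [specF]
  | cons x xs ih =>
    intro pre
    obtain ⟨hb, hp⟩ := ih (pre ++ [x])
    constructor
    · intro j hj
      simp only [specF, List.mem_append] at hj
      rcases hj with hj | hj
      · split_ifs at hj with h
        · simp at hj; subst hj; refine ⟨by simp, by simp⟩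
        · simp at hj
      · have := hb j hj; simp at this ⊢; omega
    · simp only [specF]
      split_ifs with h
      · simp only [List.singleton_append, List.pairwise_cons]
        refine ⟨fun j hj => ?_, hp⟩
        have := (hb j hj).1; simp at this; omega
      · simpa using hp

lemma flat_perm (mc : Int) : ∀ (all : List String),
    ((PySem.Set.ofList all).flatMap (fun nm => (occ all nm).take (max mc 0).toNat)).Perm
      (specF mc [] all) := by
  intro all
  induction all using List.reverseRecOn with
  | nil => simp [PySem.Set.ofList, specF]
  | append_singleton all x ih =>
    have hset : PySem.Set.ofList (all ++ [x]) = PySem.Set.add (PySem.Set.ofList all) x := by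
      rw [PySem.Set.ofList_eq_foldl, List.foldl_append, ← PySem.Set.ofList_eq_foldl]
      rfl
    set K := (max mc 0).toNat with hK
    set n : Int := (all.length : Int) with hn
    set g : String → List Int := fun nm => (occ all nm).take K with hg
    set g' : String → List Int := fun nm => (occ (all ++ [x]) nm).take K with hg'
    have hgne : ∀ nm, nm ≠ x → g' nm = g nm := by
      intro nm h
      simp only [hg', hg, occ_append]
      simp [Ne.symm h]
    set tail : List Int := if (all.count x < K) then [n] else [] with htail
    have hlen : (occ all x).length = all.count x := occ_length all x
    have hgx : g' x = g x ++ tail := by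
      simp only [hg', hg, occ_append, htail]
      rcases lt_or_ge (all.count x) K with h | h
      · rw [if_pos h,
          List.take_of_length_le (by simp [hlen]; omega),
          List.take_of_length_le (by rw [hlen]; omega)]
        simp [hn]
      · rw [if_neg (Nat.not_lt.mpr h),
          List.take_append_of_le_length (by rw [hlen]; exact h)]
        simp
    have hspec : specF mc [] (all ++ [x]) = specF mc [] all ++ tail := by
      rw [specF_append]
      congr 1
      simp only [htail, List.nil_append]
      by_cases h : ((all.count x : Int) + 1 ≤ mc)
      · rw [if_pos h, if_pos (by rw [hK]; exact (cond_iff mc _).mpr h)]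
      · rw [if_neg h, if_neg (by rw [hK]; exact fun hc => h ((cond_iff mc _).mp hc))]
    rw [hspec, hset]
    by_cases hmem : x ∈ PySem.Set.ofList all
    · have hadd : PySem.Set.add (PySem.Set.ofList all) x = PySem.Set.ofList all := by
        simp [PySem.Set.add, PySem.Set.contains, hmem]
      rw [hadd]
      obtain ⟨s1, s2, hsplit⟩ := List.append_of_mem hmem
      have hnd : (PySem.Set.ofList all).Nodup := PySem.Set.nodup_ofList all
      rw [hsplit] at hnd ih ⊢
      have hnd2 := List.nodup_middle.mp hnd
      rw [List.nodup_cons] at hnd2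
      have hx1 : x ∉ s1 := fun h => hnd2.1 (List.mem_append.mpr (Or.inl h))
      have hx2 : x ∉ s2 := fun h => hnd2.1 (List.mem_append.mpr (Or.inr h))
      simp only [List.flatMap_append, List.flatMap_cons] at ih ⊢
      rw [flatMap_congr_of_not_mem g g' x hgne s1 hx1,
          flatMap_congr_of_not_mem g g' x hgne s2 hx2, hgx]
      refine List.Perm.trans ?_ (List.Perm.append ih (List.Perm.refl tail))
      have hp2 := ((List.perm_append_comm (l₁ := tail) (l₂ := s2.flatMap g)).append_left
        (g x)).append_left (s1.flatMap g)
      simpa [List.append_assoc] using hp2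
    · have hadd : PySem.Set.add (PySem.Set.ofList all) x = PySem.Set.ofList all ++ [x] := by
        simp [PySem.Set.add, PySem.Set.contains, hmem]
      rw [hadd]
      have hnotin : x ∉ all := by simpa [PySem.Set.mem_ofList] using hmem
      have hocc : occ all x = [] := by
        have h0 := occ_length all x
        rw [List.count_eq_zero_of_not_mem hnotin] at h0
        exact List.eq_nil_of_length_eq_zero h0
      simp only [List.flatMap_append, List.flatMap_cons, List.flatMap_nil, List.append_nil]
      rw [flatMap_congr_of_not_mem g g' x hgne (PySem.Set.ofList all) hmem, hgx]
      have hgxnil : g x = [] := by simp [hg, hocc]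
      rw [hgxnil, List.nil_append]
      exact List.Perm.append ih (List.Perm.refl _)

-- the group dict built by port B
lemma groups_getD (all : List String) (nm : String) :
    PySem.Dict.getD ((PySem.List.enumerate all 0).foldl
      (fun d p => PySem.Dict.modify d p.2 [] (fun l => l ++ [p.1])) PySem.Dict.empty) nm []
      = occ all nm := by
  have hmap : (PySem.List.enumerate all 0).foldl
      (fun d p => PySem.Dict.modify d p.2 [] (fun l => l ++ [p.1])) PySem.Dict.empty
      = ((PySem.List.enumerate all 0).map Prod.swap).foldl
      (fun d p => PySem.Dict.modify d p.1 [] (fun l => l ++ [p.2])) PySem.Dict.empty := by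
    rw [List.foldl_map]
    rfl
  rw [hmap, PySem.Dict.getD_foldl_modify_append, PySem.Dict.getD_empty, List.nil_append]
  unfold occ
  rw [List.filter_map, List.map_map]
  rfl

theorem alt_eq_sorted (all : List String) (mc : Int) :
    filter_counts_alt all mc
      = PySem.List.sorted ((PySem.Set.ofList all).flatMap
          (fun nm => (occ all nm).take (max mc 0).toNat)) (fun x => x) false := by
  simp only [filter_counts_alt]
  congr 1
  rw [PySem.List.foldl_append_eq_flatMap, List.nil_append]
  set groups := (PySem.List.enumerate all 0).foldl
      (fun d p => PySem.Dict.modify d p.2 [] (fun l => l ++ [p.1])) PySem.Dict.empty with hgr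
  have hnd : (PySem.Dict.keys groups).Nodup := by
    rw [hgr]
    exact PySem.Dict.nodup_keys_foldl_modify_key _ _ _ _ _ PySem.Dict.nodup_keys_empty
  have hkeys : PySem.Dict.keys groups = PySem.Set.ofList all := by
    rw [hgr, PySem.Dict.keys_foldl_modify_key]
    rw [PySem.List.map_snd_enumerate]
    simp [PySem.Set.update, PySem.Set.ofList_eq_foldl, PySem.Dict.keys_empty]
  rw [PySem.Dict.values_eq_map_keys groups hnd [], hkeys, List.flatMap_map]
  have hfun : (fun a => PySem.List.slice (PySem.Dict.getD groups a []) none (some (max mc 0)))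
      = fun nm => (occ all nm).take (max mc 0).toNat := by
    funext nm
    rw [PySem.List.slice_to _ (le_max_right _ _), hgr, groups_getD]
  exact congrArg (fun f => List.flatMap f (PySem.Set.ofList all)) hfun

-- ===== VERDICT (by name: the statement is the Claim_ definition above) =====
theorem filter_counts_spec : Claim_equal_filter_counts := by
  intro all mc _
  unfold Spec_filter_counts filter_counts
  have hA := loopA_eq mc all [] PySem.Dict.empty []
    (by intro nm; simp [PySem.Dict.getD_empty])
  simp only [List.length_nil, Int.natCast_zero, List.nil_append] at hA
  rw [hA, alt_eq_sorted]
  obtain ⟨_, hpw⟩ := specF_bounds mc all []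
  exact (PySem.List.sorted_eq_of_perm_of_pairwise_lt _ _ (fun x : Int => x) ((flat_perm mc all).symm) hpw).symm
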